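-- pv_equiv track=rewrite | github.com/gyfbianhuanyun/DNA_storage_simulator_GAN | seq_simul/statistics/seq_statistics.py | classify_set
-- ===== SOURCE A (Python) =====
-- def classify_set(ins_pair_sets, del_pair_sets, sub_pair_sets):
--     r"""
--         This function classifies substitution sets
--
--         INPUT:
--             ins_pair_sets (:obj:`list`):
--                 list of the paired insertion error.
--             del_pair_sets (:obj:`list`):
--                 list of the paired deletion error.
--             sub_pair_sets (:obj:`list`):
--                 list of the paired substitution error.
--         OUTPUT:
--             ins_pair_dict (:obj:`dict`):
--                 classified list of the insertion error pair.
--             del_pair_dict (:obj:`dict`):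
--                 classified list of the deletion error pair.
--             sub_pair_dict (:obj:`dict`):
--                 classified list of the substitution error pair.
--     """
--     ins_pair_dict = {"-A": 0, "-C": 0, "-G": 0, "-T": 0}
--     del_pair_dict = {"A-": 0, "C-": 0, "G-": 0, "T-": 0}
--     sub_pair_dict = {"AC": 0, "AG": 0, "AT": 0,
--                      "CA": 0, "CG": 0, "CT": 0,
--                      "GA": 0, "GC": 0, "GT": 0,
--                      "TA": 0, "TC": 0, "TG": 0}
--
--     for i in range(len(ins_pair_sets)):
--         if ins_pair_sets[i] in ins_pair_dict:
--             ins_pair_dict[ins_pair_sets[i]] += 1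
--     for i in range(len(del_pair_sets)):
--         if del_pair_sets[i] in del_pair_dict:
--             del_pair_dict[del_pair_sets[i]] += 1
--     for i in range(len(sub_pair_sets)):
--         if sub_pair_sets[i] in sub_pair_dict:
--             sub_pair_dict[sub_pair_sets[i]] += 1
--
--     return ins_pair_dict, del_pair_dict, sub_pair_dict
-- ===== SOURCE B (Python) =====
-- _INS_KEYS = ("-A", "-C", "-G", "-T")
-- _DEL_KEYS = ("A-", "C-", "G-", "T-")
-- _SUB_KEYS = ("AC", "AG", "AT",
--              "CA", "CG", "CT",
--              "GA", "GC", "GT",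
--              "TA", "TC", "TG")
--
--
-- def classify_set(ins_pair_sets, del_pair_sets, sub_pair_sets):
--     return ({k: ins_pair_sets.count(k) for k in _INS_KEYS},
--             {k: del_pair_sets.count(k) for k in _DEL_KEYS},
--             {k: sub_pair_sets.count(k) for k in _SUB_KEYS})
-- ===== Notes on version B (the rewrite author's own statement) =====
-- stated objective: simpler
-- what changed: Drops A's mutable fixed-key dicts and guarded scan-and-increment data loops entirely; B loops over the fixed keys and computes each value with a per-key list.count scan (outer loop over keys, inner scan over data).
import Mathlib
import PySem

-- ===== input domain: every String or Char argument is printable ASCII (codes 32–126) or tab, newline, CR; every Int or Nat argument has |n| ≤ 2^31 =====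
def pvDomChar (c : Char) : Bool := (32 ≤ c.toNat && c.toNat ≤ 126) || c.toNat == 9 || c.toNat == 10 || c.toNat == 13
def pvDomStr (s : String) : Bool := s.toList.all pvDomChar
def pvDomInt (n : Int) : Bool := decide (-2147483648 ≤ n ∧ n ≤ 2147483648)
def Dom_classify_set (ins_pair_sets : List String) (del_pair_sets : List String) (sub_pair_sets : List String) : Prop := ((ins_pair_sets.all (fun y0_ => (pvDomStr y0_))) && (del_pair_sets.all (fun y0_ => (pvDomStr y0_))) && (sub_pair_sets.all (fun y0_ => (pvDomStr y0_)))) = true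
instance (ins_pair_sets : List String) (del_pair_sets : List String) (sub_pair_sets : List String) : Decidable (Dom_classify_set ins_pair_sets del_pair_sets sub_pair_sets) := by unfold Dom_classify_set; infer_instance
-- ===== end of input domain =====

-- B drops A's mutable fixed-key dicts and data-scanning loops: it loops over the fixed keys
-- and computes each value with a per-key list.count scan; same return values (objective: simpler).

-- ===== PORT A =====
-- the dict literals of A, as insertion-ordered dicts
def pvInsDict0 : PySem.Dict String Int :=
  PySem.Dict.mk [("-A", 0), ("-C", 0), ("-G", 0), ("-T", 0)]
def pvDelDict0 : PySem.Dict String Int :=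
  PySem.Dict.mk [("A-", 0), ("C-", 0), ("G-", 0), ("T-", 0)]
def pvSubDict0 : PySem.Dict String Int :=
  PySem.Dict.mk [("AC", 0), ("AG", 0), ("AT", 0),
                 ("CA", 0), ("CG", 0), ("CT", 0),
                 ("GA", 0), ("GC", 0), ("GT", 0),
                 ("TA", 0), ("TC", 0), ("TG", 0)]

-- for i in range(len(xs)): if xs[i] in d: d[xs[i]] += 1
def pvCountLoop (xs : List String) (d : PySem.Dict String Int) : PySem.Dict String Int :=
  (PySem.List.pyRange 0 (xs.length : Int) 1).foldl
    (fun d i =>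
      let s := PySem.List.pyGetD xs i ""
      if d.contains s then d.modify s 0 (· + 1) else d) d

def classify_set (ins_pair_sets : List String) (del_pair_sets : List String) (sub_pair_sets : List String) : (List (String × Int)) × (List (String × Int)) × (List (String × Int)) :=
  ((pvCountLoop ins_pair_sets pvInsDict0).items,
   (pvCountLoop del_pair_sets pvDelDict0).items,
   (pvCountLoop sub_pair_sets pvSubDict0).items)

-- ===== PORT B =====
def pvInsKeys : List String := ["-A", "-C", "-G", "-T"]
def pvDelKeys : List String := ["A-", "C-", "G-", "T-"]
def pvSubKeys : List String :=
  ["AC", "AG", "AT", "CA", "CG", "CT", "GA", "GC", "GT", "TA", "TC", "TG"]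

-- {k: pair_sets.count(k) for k in keys}
def pvCountByKey (xs : List String) (ks : List String) : List (String × Int) :=
  ks.map (fun k => (k, PySem.List.count xs k))

def classify_set_alt (ins_pair_sets : List String) (del_pair_sets : List String) (sub_pair_sets : List String) : (List (String × Int)) × (List (String × Int)) × (List (String × Int)) :=
  (pvCountByKey ins_pair_sets pvInsKeys,
   pvCountByKey del_pair_sets pvDelKeys,
   pvCountByKey sub_pair_sets pvSubKeys)

-- ===== PRECONDITION & SPEC =====
def Spec_classify_set (ins_pair_sets : List String) (del_pair_sets : List String) (sub_pair_sets : List String) (out : (List (String × Int)) × (List (String × Int)) × (List (String × Int))) : Prop := out = classify_set_alt ins_pair_sets del_pair_sets sub_pair_sets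
instance (ins_pair_sets : List String) (del_pair_sets : List String) (sub_pair_sets : List String) (out : (List (String × Int)) × (List (String × Int)) × (List (String × Int))) : Decidable (Spec_classify_set ins_pair_sets del_pair_sets sub_pair_sets out) := by unfold Spec_classify_set; infer_instance

-- ===== CLAIM (what is proved, stated in full; the proofs are below) =====
def Claim_equal_classify_set : Prop := ∀ (ins_pair_sets : List String) (del_pair_sets : List String) (sub_pair_sets : List String), Dom_classify_set ins_pair_sets del_pair_sets sub_pair_sets → Spec_classify_set ins_pair_sets del_pair_sets sub_pair_sets (classify_set ins_pair_sets del_pair_sets sub_pair_sets)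

-- ===== LEMMAS AND PROOFS =====

-- the guarded step of A's loop, written over the element (index eliminated)
def pvStep (d : PySem.Dict String Int) (s : String) : PySem.Dict String Int :=
  if d.contains s then d.modify s 0 (· + 1) else d

theorem pvCountLoop_eq_foldl (xs : List String) (d : PySem.Dict String Int) :
    pvCountLoop xs d = xs.foldl pvStep d := by
  unfold pvCountLoop pvStep
  have := PySem.List.foldl_pyRange_pyGetD (xs := xs) (a := 0)
    (f := fun d s => if d.contains s then d.modify s 0 (· + 1) else d) (d := "") (init := d)
    (by omega)
  simpa using this

theorem pvStep_keys (d : PySem.Dict String Int) (s : String) :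
    (pvStep d s).keys = d.keys := by
  unfold pvStep
  split
  · rename_i h
    rw [PySem.Dict.keys_modify, PySem.Dict.keys_insert_of_contains]
    simpa [PySem.Dict.contains_modify] using h
  · rfl

theorem pvFoldl_keys (xs : List String) (d : PySem.Dict String Int) :
    (xs.foldl pvStep d).keys = d.keys := by
  induction xs generalizing d with
  | nil => rfl
  | cons x t ih => simp [List.foldl_cons, ih, pvStep_keys]

theorem pvFoldl_getD (xs : List String) (d : PySem.Dict String Int) (k : String)
    (hk : d.contains k = true) :
    (xs.foldl pvStep d).getD k 0 = d.getD k 0 + xs.count k := by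
  induction xs generalizing d with
  | nil => simp
  | cons x t ih =>
    rw [List.foldl_cons]
    by_cases hx : d.contains x = true
    · have hstep : pvStep d x = d.modify x 0 (· + 1) := by simp [pvStep, hx]
      rw [hstep, ih _ (by simp [PySem.Dict.contains_modify, hk])]
      rw [PySem.Dict.getD_modify]
      by_cases hkx : k = x
      · subst hkx; simp; ring
      · simp [hkx, Ne.symm hkx]
    · have hstep : pvStep d x = d := by simp [pvStep, hx]
      have hkx : k ≠ x := by rintro rfl; exact hx hk
      rw [hstep, ih _ hk, List.count_cons]
      simp [Ne.symm hkx]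

-- one family: A's guarded loop over a zero-initialised fixed-key dict equals B's per-key count
theorem pvFamily (ks : List String) (xs : List String)
    (hnd : ks.Nodup)
    (hkeys : (PySem.Dict.mk (ks.map (fun s => (s, (0 : Int))))).keys = ks)
    (hzero : ∀ k ∈ ks, (PySem.Dict.mk (ks.map (fun s => (s, (0 : Int))))).getD k 0 = 0) :
    (pvCountLoop xs (PySem.Dict.mk (ks.map (fun s => (s, (0 : Int)))))).items
      = pvCountByKey xs ks := by
  set d0 := PySem.Dict.mk (ks.map (fun s => (s, (0 : Int)))) with hd0
  have hndk : (xs.foldl pvStep d0).keys.Nodup := by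
    rw [pvFoldl_keys, hkeys]; exact hnd
  rw [pvCountLoop_eq_foldl]
  rw [PySem.Dict.items_eq_map_keys _ hndk 0, pvFoldl_keys, hkeys]
  unfold pvCountByKey
  apply List.map_congr_left
  intro k hk
  have hc : d0.contains k = true := by
    rw [PySem.Dict.contains_iff_mem_keys]
    rwa [hkeys]
  rw [pvFoldl_getD xs d0 k hc, hzero k hk, PySem.List.count_eq]
  simp

-- ===== VERDICT (by name: the statement is the Claim_ definition above) =====
theorem classify_set_spec : Claim_equal_classify_set := by
  intro ins del sub _
  unfold Spec_classify_set classify_set classify_set_alt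
  refine congrArg₂ Prod.mk ?_ (congrArg₂ Prod.mk ?_ ?_)
  · exact pvFamily pvInsKeys ins (by decide) (by decide) (by decide)
  · exact pvFamily pvDelKeys del (by decide) (by decide) (by decide)
  · exact pvFamily pvSubKeys sub (by decide) (by decide) (by decide)
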